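-- pv_equiv track=rewrite | github.com/pwninator/jokes | py_quill/services/mouth_event_detection_tts_timing.py | _iter_word_spans
-- ===== SOURCE A (Python) =====
-- def _iter_word_spans(characters: list[str]) -> list[tuple[int, int]]:
--   """Return `(start, end)` character index spans for word-like runs.
--
--   A "word" here is a contiguous run of `isalnum()` characters, apostrophes, and
--   hyphens. Leading/trailing punctuation is trimmed off the span.
--   """
--   spans: list[tuple[int, int]] = []
--   n = len(characters)
--   i = 0
--   while i < n:
--     if not _is_word_char(characters[i]):
--       i += 1
--       continue
--
--     start = i
--     while i < n and _is_word_char(characters[i]):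
--       i += 1
--     end = i
--
--     while start < end and characters[start] in ("'", "-"):
--       start += 1
--     while start < end and characters[end - 1] in ("'", "-"):
--       end -= 1
--     if start < end:
--       spans.append((start, end))
--
--   return spans
--
-- def _is_word_char(ch: str) -> bool:
--   if not ch:
--     return False
--   if ch.isalnum():
--     return True
--   return ch in ("'", "-")
-- ===== SOURCE B (Python) =====
-- def _iter_word_spans(characters: list[str]) -> list[tuple[int, int]]:
--   """Endpoint characterization instead of run extraction: classify each
--   character as alnum ('A'), trimmable punctuation ('P') or other ('O').
--   An index j STARTS a trimmed span iff cls[j] == 'A' and the nearest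
--   non-'P' class to its left is 'O' (or there is none); it ENDS one iff
--   cls[j] == 'A' and the nearest non-'P' class to its right is 'O' (or
--   none).  Each word run with at least one alnum character contributes
--   exactly one start and one end, in interleaved order, so two independent
--   directional sweeps collect the starts and ends and zipping them yields
--   the spans."""
--   cls = []
--   for ch in characters:
--     if ch and ch.isalnum():
--       cls.append('A')
--     elif ch in ("'", "-"):
--       cls.append('P')
--     else:
--       cls.append('O')
--   starts = []
--   left = 'O'
--   for j, c in enumerate(cls):
--     if c == 'A' and left == 'O':
--       starts.append(j)
--     if c != 'P':
--       left = c
--   ends = []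
--   right = 'O'
--   for j, c in reversed(list(enumerate(cls))):
--     if c == 'A' and right == 'O':
--       ends.append(j + 1)
--     if c != 'P':
--       right = c
--   ends.reverse()
--   return list(zip(starts, ends))
-- ===== Notes on version B (the rewrite author's own statement) =====
-- stated objective: alternative
-- what changed: Replaced run extraction with trimming (outer scan + inner run-advance + two trim loops) by an endpoint characterization: classify each character as alnum/trim-punctuation/other, then two independent directional sweeps collect span starts (alnum whose nearest non-punctuation neighbour to the left is non-word) and span ends (symmetrically from the right), and the spans are the zip of the two lists.
import Mathlib
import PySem

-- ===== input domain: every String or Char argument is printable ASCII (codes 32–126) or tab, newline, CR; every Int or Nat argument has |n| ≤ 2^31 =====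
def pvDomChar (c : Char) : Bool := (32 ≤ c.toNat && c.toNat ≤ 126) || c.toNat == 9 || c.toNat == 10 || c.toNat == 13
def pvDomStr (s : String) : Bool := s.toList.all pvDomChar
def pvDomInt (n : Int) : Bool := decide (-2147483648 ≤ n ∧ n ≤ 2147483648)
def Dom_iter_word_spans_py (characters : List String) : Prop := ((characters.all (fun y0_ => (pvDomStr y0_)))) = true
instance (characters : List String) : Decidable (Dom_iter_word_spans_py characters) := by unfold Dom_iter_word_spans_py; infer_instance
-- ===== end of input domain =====

-- B replaces A's run extraction + trimming by an endpoint characterization: classify every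
-- character as alnum / trim punctuation / other, collect span starts in a left-to-right sweep
-- and span ends in a right-to-left sweep, and zip the two lists (objective: alternative,
-- same return value; no side effects involved).

-- ===== PORT A =====
-- the Python module's _is_word_char, and the `ch in ("'", "-")` tuple-membership test
def pvIsWordCharPy (ch : String) : Bool :=
  if ch = "" then false
  else if PySem.Str.strIsalnum ch then true
  else ch == "'" || ch == "-"

def pvIsTrimCharPy (ch : String) : Bool := ch == "'" || ch == "-"

-- inner `while i < n and _is_word_char(characters[i])` loop (entered after the first step)
def pvFindEnd (chars : List String) (i : Int) : Int :=
  if h : i < (chars.length : Int) ∧ pvIsWordCharPy (PySem.List.pyGetD chars i "") = true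
  then pvFindEnd chars (i + 1) else i
termination_by ((chars.length : Int) - i).toNat
decreasing_by
  exact (Int.toNat_lt_toNat (Int.sub_pos.mpr h.1)).mpr (sub_lt_sub_left (lt_add_one i) _)

-- `while start < end and characters[start] in ("'", "-")`
def pvTrimStart (chars : List String) (s e : Int) : Int :=
  if h : s < e ∧ pvIsTrimCharPy (PySem.List.pyGetD chars s "") = true
  then pvTrimStart chars (s + 1) e else s
termination_by (e - s).toNat
decreasing_by
  exact (Int.toNat_lt_toNat (Int.sub_pos.mpr h.1)).mpr (sub_lt_sub_left (lt_add_one s) _)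

-- `while start < end and characters[end - 1] in ("'", "-")`
def pvTrimEnd (chars : List String) (s e : Int) : Int :=
  if h : s < e ∧ pvIsTrimCharPy (PySem.List.pyGetD chars (e - 1) "") = true
  then pvTrimEnd chars s (e - 1) else e
termination_by (e - s).toNat
decreasing_by
  exact (Int.toNat_lt_toNat (Int.sub_pos.mpr h.1)).mpr (sub_lt_sub_right (sub_one_lt e) s)

theorem pvFindEnd_ge (chars : List String) (i : Int) : i ≤ pvFindEnd chars i := by
  unfold pvFindEnd
  split
  case isTrue h =>
    exact le_trans (le_of_lt (lt_add_one i)) (pvFindEnd_ge chars (i + 1))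
  case isFalse _ => exact le_refl i
termination_by ((chars.length : Int) - i).toNat
decreasing_by
  rename_i h
  exact (Int.toNat_lt_toNat (Int.sub_pos.mpr h.1)).mpr (sub_lt_sub_left (lt_add_one i) _)

-- the outer `while i < n` loop, carrying the spans accumulator
def pvLoopA (chars : List String) (i : Int) (spans : List (Int × Int)) : List (Int × Int) :=
  if h : i < (chars.length : Int) then
    if pvIsWordCharPy (PySem.List.pyGetD chars i "") = false then
      pvLoopA chars (i + 1) spans
    else
      let e := pvFindEnd chars (i + 1)
      let s := pvTrimStart chars i e
      let e' := pvTrimEnd chars s e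
      pvLoopA chars e (if s < e' then spans ++ [(s, e')] else spans)
  else spans
termination_by ((chars.length : Int) - i).toNat
decreasing_by
  · exact (Int.toNat_lt_toNat (Int.sub_pos.mpr h)).mpr (sub_lt_sub_left (lt_add_one i) _)
  · exact (Int.toNat_lt_toNat (Int.sub_pos.mpr h)).mpr
      (sub_lt_sub_left (lt_of_lt_of_le (lt_add_one i) (pvFindEnd_ge chars (i + 1))) _)

def iter_word_spans_py (characters : List String) : List (Int × Int) :=
  pvLoopA characters 0 []

-- ===== PORT B =====
-- `'A' if ch and ch.isalnum() else ('P' if ch in ("'", "-") else 'O')`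
def pvClsOf (ch : String) : Char :=
  if (ch != "") && PySem.Str.strIsalnum ch then 'A'
  else if ch == "'" || ch == "-" then 'P'
  else 'O'

-- body of the forward (starts) sweep; state = (left, starts)
def pvStartStep (st : Char × List Int) (p : Int × Char) : Char × List Int :=
  let st1 := if p.2 == 'A' && st.1 == 'O' then (st.1, st.2 ++ [p.1]) else st
  if p.2 != 'P' then (p.2, st1.2) else st1

-- body of the backward (ends) sweep; state = (right, ends)
def pvEndStep (st : Char × List Int) (p : Int × Char) : Char × List Int :=
  let st1 := if p.2 == 'A' && st.1 == 'O' then (st.1, st.2 ++ [p.1 + 1]) else st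
  if p.2 != 'P' then (p.2, st1.2) else st1

def iter_word_spans_py_alt (characters : List String) : List (Int × Int) :=
  let cls := characters.map pvClsOf
  let starts := ((PySem.List.enumerate cls).foldl pvStartStep ('O', [])).2
  let ends := ((((PySem.List.enumerate cls).reverse).foldl pvEndStep ('O', [])).2).reverse
  starts.zip ends

-- ===== PRECONDITION & SPEC =====
def Spec_iter_word_spans_py (characters : List String) (out : List (Int × Int)) : Prop := out = iter_word_spans_py_alt characters
instance (characters : List String) (out : List (Int × Int)) : Decidable (Spec_iter_word_spans_py characters out) := by unfold Spec_iter_word_spans_py; infer_instance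

-- ===== CLAIM (what is proved, stated in full; the proofs are below) =====
def Claim_equal_iter_word_spans_py : Prop := ∀ (characters : List String), Dom_iter_word_spans_py characters → Spec_iter_word_spans_py characters (iter_word_spans_py characters)

-- ===== LEMMAS AND PROOFS =====

-- canonical per-character specification: open span = (first alnum of the run, last alnum + 1 so far)
def specGo : List Char → Int → Option (Int × Int) → List (Int × Int)
  | [], _, none => []
  | [], _, some se => [se]
  | c :: cs, j, none =>
      if c = 'A' then specGo cs (j + 1) (some (j, j + 1)) else specGo cs (j + 1) none
  | c :: cs, j, some se =>
      if c = 'A' then specGo cs (j + 1) (some (se.1, j + 1))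
      else if c = 'P' then specGo cs (j + 1) (some se)
      else se :: specGo cs (j + 1) none

-- emission list of the forward sweep
def startsGo : List Char → Int → Char → List Int
  | [], _, _ => []
  | c :: cs, j, l =>
      if c = 'A' ∧ l = 'O' then j :: startsGo cs (j + 1) (if c = 'P' then l else c)
      else startsGo cs (j + 1) (if c = 'P' then l else c)

-- class of the first non-'P' element ('O' if none)
def fNP : List Char → Char
  | [] => 'O'
  | c :: cs => if c = 'P' then fNP cs else c

theorem pvClsOf_cases (ch : String) : pvClsOf ch = 'A' ∨ pvClsOf ch = 'P' ∨ pvClsOf ch = 'O' := by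
  unfold pvClsOf; split_ifs <;> simp

theorem cls_trim (ch : String) : pvIsTrimCharPy ch = (pvClsOf ch == 'P') := by
  by_cases h1 : ch = "'"
  · subst h1; decide
  by_cases h2 : ch = "-"
  · subst h2; decide
  unfold pvIsTrimCharPy pvClsOf
  have e1 : (ch == "'") = false := by simp [h1]
  have e2 : (ch == "-") = false := by simp [h2]
  rw [e1, e2]
  split_ifs <;> simp_all

theorem cls_word (ch : String) : pvIsWordCharPy ch = (pvClsOf ch != 'O') := by
  by_cases h1 : ch = "'"
  · subst h1; decide
  by_cases h2 : ch = "-"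
  · subst h2; decide
  unfold pvIsWordCharPy pvClsOf
  by_cases h0 : ch = ""
  · subst h0; decide
  rw [if_neg h0]
  have e0 : (ch != "") = true := by simp [h0]
  have e1 : (ch == "'") = false := by simp [h1]
  have e2 : (ch == "-") = false := by simp [h2]
  rw [e0, e1, e2]
  simp only [Bool.true_and, Bool.or_self]
  by_cases ha : PySem.Chars.strIsalnum ch.toList = true <;> simp [ha]

theorem trim_imp_word (ch : String) (h : pvIsTrimCharPy ch = true) : pvIsWordCharPy ch = true := by
  rw [cls_trim] at h
  rw [cls_word]
  have : pvClsOf ch = 'P' := by simpa using h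
  rw [this]; decide

theorem cls_drop (chars : List String) (i : Nat) (h : i < chars.length) :
    (chars.map pvClsOf).drop i = pvClsOf (chars.getD i "") :: (chars.map pvClsOf).drop (i + 1) := by
  rw [List.drop_eq_getElem_cons (by simpa using h)]
  congr 1
  rw [List.getElem_map, List.getD_eq_getElem _ _ h]

-- ---------- A-side loop lemmas ----------

theorem pvTrimStart_id (chars : List String) (s e : Int) (h : ¬ s < e) :
    pvTrimStart chars s e = s := by
  rw [pvTrimStart]; simp [h]

theorem pvTrimEnd_id (chars : List String) (s e : Int) (h : ¬ s < e) :
    pvTrimEnd chars s e = e := by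
  rw [pvTrimEnd]; simp [h]

theorem pvFindEnd_stop (chars : List String) (i : Int)
    (h : ¬ (i < (chars.length : Int) ∧ pvIsWordCharPy (PySem.List.pyGetD chars i "") = true)) :
    pvFindEnd chars i = i := by
  rw [pvFindEnd]; simp [h]

theorem pvFindEnd_step (chars : List String) (i : Int)
    (h : i < (chars.length : Int) ∧ pvIsWordCharPy (PySem.List.pyGetD chars i "") = true) :
    pvFindEnd chars i = pvFindEnd chars (i + 1) := by
  rw [pvFindEnd]; simp [h]

theorem pvTrimStart_stop (chars : List String) (s e : Int)
    (hp : pvIsTrimCharPy (PySem.List.pyGetD chars s "") = false) :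
    pvTrimStart chars s e = s := by
  rw [pvTrimStart]; simp [hp]

theorem pvLoopA_end (chars : List String) (i : Int) (spans : List (Int × Int))
    (h : ¬ i < (chars.length : Int)) : pvLoopA chars i spans = spans := by
  rw [pvLoopA, dif_neg h]

theorem pvLoopA_nonword (chars : List String) (i : Int) (spans : List (Int × Int))
    (h1 : i < (chars.length : Int)) (h2 : pvIsWordCharPy (PySem.List.pyGetD chars i "") = false) :
    pvLoopA chars i spans = pvLoopA chars (i + 1) spans := by
  rw [pvLoopA, dif_pos h1, if_pos h2]

-- A's emit step (trim, then conditional append), factored for the proof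
def pvEmitA (chars : List String) (s e : Int) (spans : List (Int × Int)) : List (Int × Int) :=
  if pvTrimStart chars s e < pvTrimEnd chars (pvTrimStart chars s e) e then
    spans ++ [(pvTrimStart chars s e, pvTrimEnd chars (pvTrimStart chars s e) e)]
  else spans

theorem pvLoopA_word (chars : List String) (i : Int) (spans : List (Int × Int))
    (h1 : i < (chars.length : Int)) (h2 : pvIsWordCharPy (PySem.List.pyGetD chars i "") = true) :
    pvLoopA chars i spans
      = pvLoopA chars (pvFindEnd chars (i + 1))
          (pvEmitA chars i (pvFindEnd chars (i + 1)) spans) := by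
  rw [pvLoopA, dif_pos h1, if_neg (by simp [h2])]
  dsimp only [pvEmitA]

-- trailing-punctuation trim lands exactly on the recorded open end
theorem pvTrimEnd_of_Ps (chars : List String) (s e : Int) : ∀ (E : Int), e ≤ E → s < e →
    pvIsTrimCharPy (PySem.List.pyGetD chars (e - 1) "") = false →
    (∀ j : Int, e ≤ j → j < E → pvIsTrimCharPy (PySem.List.pyGetD chars j "") = true) →
    pvTrimEnd chars s E = e := by
  intro E hE hse he hp
  rcases eq_or_lt_of_le hE with heq | hlt
  · subst heq
    rw [pvTrimEnd]
    simp [he]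
  · rw [pvTrimEnd, dif_pos ⟨by omega, hp (E - 1) (by omega) (by omega)⟩]
    exact pvTrimEnd_of_Ps chars s e (E - 1) (by omega) hse he
      (fun j h1 h2 => hp j h1 (by omega))
termination_by E => (E - e).toNat
decreasing_by omega

theorem pvTrimEnd_gt (chars : List String) (s : Int)
    (hs : pvIsTrimCharPy (PySem.List.pyGetD chars s "") = false) :
    ∀ e : Int, s < e → s < pvTrimEnd chars s e := by
  intro e hse
  rw [pvTrimEnd]
  by_cases h : s < e ∧ pvIsTrimCharPy (PySem.List.pyGetD chars (e - 1) "") = true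
  · rw [dif_pos h]
    have hne : s < e - 1 := by
      rcases eq_or_lt_of_le (by omega : s ≤ e - 1) with heq | hlt
      · exfalso; rw [← heq] at h; rw [hs] at h; simp at h
      · exact hlt
    exact pvTrimEnd_gt chars s hs (e - 1) hne
  · rw [dif_neg h]; exact hse
termination_by e => (e - s).toNat
decreasing_by omega

-- skipping one leading trim-punctuation character of a run does not change the loop's result
theorem pvLoopA_skipP (chars : List String) (i : Int) (spans : List (Int × Int))
    (hi : i < (chars.length : Int))
    (ht : pvIsTrimCharPy (PySem.List.pyGetD chars i "") = true) :
    pvLoopA chars i spans = pvLoopA chars (i + 1) spans := by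
  have hw : pvIsWordCharPy (PySem.List.pyGetD chars i "") = true := trim_imp_word _ ht
  rw [pvLoopA_word chars i spans hi hw]
  have hE : i + 1 ≤ pvFindEnd chars (i + 1) := pvFindEnd_ge chars (i + 1)
  have hts : pvTrimStart chars i (pvFindEnd chars (i + 1))
      = pvTrimStart chars (i + 1) (pvFindEnd chars (i + 1)) := by
    rw [pvTrimStart, dif_pos ⟨by omega, ht⟩]
  have hemit : pvEmitA chars i (pvFindEnd chars (i + 1)) spans
      = pvEmitA chars (i + 1) (pvFindEnd chars (i + 1)) spans := by
    unfold pvEmitA; rw [hts]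
  rw [hemit]
  by_cases h2 : (i + 1) < (chars.length : Int) ∧ pvIsWordCharPy (PySem.List.pyGetD chars (i + 1) "") = true
  · rw [pvFindEnd_step chars (i + 1) h2]
    rw [pvLoopA_word chars (i + 1) spans h2.1 h2.2]
  · have hfe : pvFindEnd chars (i + 1) = i + 1 := pvFindEnd_stop chars (i + 1) h2
    rw [hfe]
    have : pvEmitA chars (i + 1) (i + 1) spans = spans := by
      unfold pvEmitA
      rw [pvTrimStart_id chars (i + 1) (i + 1) (by omega), pvTrimEnd_id chars (i + 1) (i + 1) (by omega)]
      simp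
    rw [this]

-- main invariant, base case: position = length
theorem pvMainA_base (chars : List String) :
    (∀ spans, pvLoopA chars (chars.length : Int) spans
        = spans ++ specGo ((chars.map pvClsOf).drop chars.length) (chars.length : Int) none)
    ∧ (∀ (s e : Int) (spans : List (Int × Int)),
        s < e → e ≤ (chars.length : Int) →
        pvIsTrimCharPy (PySem.List.pyGetD chars (e - 1) "") = false →
        (∀ j : Int, e ≤ j → j < (chars.length : Int) → pvIsTrimCharPy (PySem.List.pyGetD chars j "") = true) →
        spans ++ specGo ((chars.map pvClsOf).drop chars.length) (chars.length : Int) (some (s, e))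
          = pvLoopA chars (pvFindEnd chars (chars.length : Int))
              (spans ++ [(s, pvTrimEnd chars s (pvFindEnd chars (chars.length : Int)))])) := by
  have hdrop : (chars.map pvClsOf).drop chars.length = [] := List.drop_eq_nil_of_le (by simp)
  have hfe : pvFindEnd chars (chars.length : Int) = (chars.length : Int) :=
    pvFindEnd_stop _ _ (by intro h; exact absurd h.1 (lt_irrefl _))
  constructor
  · intro spans
    rw [hdrop, pvLoopA_end chars _ spans (by omega)]
    simp [specGo]
  · intro s e spans hse hei he hp
    rw [hdrop, hfe, pvTrimEnd_of_Ps chars s e (chars.length : Int) hei hse he hp,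
      pvLoopA_end chars _ _ (by omega)]
    simp [specGo]

-- main invariant: A's loop from position i computes the canonical specification
theorem pvMainA (chars : List String) : ∀ (k i : Nat), i ≤ chars.length → chars.length - i ≤ k →
    (∀ spans, pvLoopA chars (i : Int) spans
        = spans ++ specGo ((chars.map pvClsOf).drop i) (i : Int) none)
    ∧ (∀ (s e : Int) (spans : List (Int × Int)),
        s < e → e ≤ (i : Int) →
        pvIsTrimCharPy (PySem.List.pyGetD chars (e - 1) "") = false →
        (∀ j : Int, e ≤ j → j < (i : Int) → pvIsTrimCharPy (PySem.List.pyGetD chars j "") = true) →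
        spans ++ specGo ((chars.map pvClsOf).drop i) (i : Int) (some (s, e))
          = pvLoopA chars (pvFindEnd chars (i : Int))
              (spans ++ [(s, pvTrimEnd chars s (pvFindEnd chars (i : Int)))])) := by
  intro k
  induction k with
  | zero =>
    intro i h1 h2
    have : i = chars.length := by omega
    subst this
    exact pvMainA_base chars
  | succ k ihk =>
    intro i h1 h2
    by_cases heq : i = chars.length
    · subst heq
      exact pvMainA_base chars
    have hlt : i < chars.length := by omega
    obtain ⟨ihP, ihQ⟩ := ihk (i + 1) (by omega) (by omega)
    have hilen : ((i : Int)) < (chars.length : Int) := by exact_mod_cast hlt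
    have hcast : ((i : Int) + 1) = ((i + 1 : Nat) : Int) := by push_cast; ring
    have hget : PySem.List.pyGetD chars (i : Int) "" = chars.getD i "" := by
      simp [PySem.List.pyGetD_natCast]
    have hword : pvIsWordCharPy (PySem.List.pyGetD chars (i : Int) "")
        = (pvClsOf (chars.getD i "") != 'O') := by rw [hget, cls_word]
    have htrim : pvIsTrimCharPy (PySem.List.pyGetD chars (i : Int) "")
        = (pvClsOf (chars.getD i "") == 'P') := by rw [hget, cls_trim]
    have hdrop := cls_drop chars i hlt
    rcases pvClsOf_cases (chars.getD i "") with hc | hc | hc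
    · -- class 'A'
      have hw : pvIsWordCharPy (PySem.List.pyGetD chars (i : Int) "") = true := by
        rw [hword, hc]; rfl
      have ht : pvIsTrimCharPy (PySem.List.pyGetD chars (i : Int) "") = false := by
        rw [htrim, hc]; rfl
      have hfe : pvFindEnd chars (i : Int) = pvFindEnd chars ((i : Int) + 1) :=
        pvFindEnd_step chars (i : Int) ⟨hilen, hw⟩
      have hsub : ((i : Int) + 1 - 1) = (i : Int) := by ring
      constructor
      · intro spans
        rw [pvLoopA_word chars (i : Int) spans hilen hw]
        have hE : (i : Int) + 1 ≤ pvFindEnd chars ((i : Int) + 1) := pvFindEnd_ge chars _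
        have hts : pvTrimStart chars (i : Int) (pvFindEnd chars ((i : Int) + 1)) = (i : Int) :=
          pvTrimStart_stop chars _ _ ht
        have hgt : (i : Int) < pvTrimEnd chars (i : Int) (pvFindEnd chars ((i : Int) + 1)) :=
          pvTrimEnd_gt chars (i : Int) ht _ (by omega)
        have hemit : pvEmitA chars (i : Int) (pvFindEnd chars ((i : Int) + 1)) spans
            = spans ++ [((i : Int), pvTrimEnd chars (i : Int) (pvFindEnd chars ((i : Int) + 1)))] := by
          unfold pvEmitA
          rw [hts, if_pos hgt]
        rw [hemit, hdrop, hc]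
        have hspec : specGo ('A' :: (chars.map pvClsOf).drop (i + 1)) (i : Int) none
            = specGo ((chars.map pvClsOf).drop (i + 1)) ((i : Int) + 1) (some ((i : Int), (i : Int) + 1)) := by
          simp [specGo]
        rw [hspec, hcast]
        exact (ihQ (i : Int) ((i + 1 : Nat) : Int) spans (by omega) (by omega)
          (by rw [show ((i + 1 : Nat) : Int) - 1 = (i : Int) by push_cast; ring]; exact ht)
          (by intro j hj1 hj2; omega)).symm
      · intro s e spans hse hei he hp
        rw [hdrop, hc]
        have hspec : specGo ('A' :: (chars.map pvClsOf).drop (i + 1)) (i : Int) (some (s, e))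
            = specGo ((chars.map pvClsOf).drop (i + 1)) ((i : Int) + 1) (some (s, (i : Int) + 1)) := by
          simp [specGo]
        rw [hspec, hfe, hcast]
        exact ihQ s ((i + 1 : Nat) : Int) spans (by omega) (by omega)
          (by rw [show ((i + 1 : Nat) : Int) - 1 = (i : Int) by push_cast; ring]; exact ht)
          (by intro j hj1 hj2; omega)
    · -- class 'P'
      have hw : pvIsWordCharPy (PySem.List.pyGetD chars (i : Int) "") = true := by
        rw [hword, hc]; rfl
      have ht : pvIsTrimCharPy (PySem.List.pyGetD chars (i : Int) "") = true := by
        rw [htrim, hc]; rfl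
      have hfe : pvFindEnd chars (i : Int) = pvFindEnd chars ((i : Int) + 1) :=
        pvFindEnd_step chars (i : Int) ⟨hilen, hw⟩
      constructor
      · intro spans
        rw [pvLoopA_skipP chars (i : Int) spans hilen ht, hcast, ihP spans, hdrop, hc]
        have hspec : specGo ('P' :: (chars.map pvClsOf).drop (i + 1)) (i : Int) none
            = specGo ((chars.map pvClsOf).drop (i + 1)) ((i : Int) + 1) none := by
          simp [specGo]
        rw [hspec, hcast]
      · intro s e spans hse hei he hp
        rw [hdrop, hc]
        have hspec : specGo ('P' :: (chars.map pvClsOf).drop (i + 1)) (i : Int) (some (s, e))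
            = specGo ((chars.map pvClsOf).drop (i + 1)) ((i : Int) + 1) (some (s, e)) := by
          simp [specGo]
        rw [hspec]
        have hp' : ∀ j : Int, e ≤ j → j < ((i + 1 : Nat) : Int)
            → pvIsTrimCharPy (PySem.List.pyGetD chars j "") = true := by
          intro j hj1 hj2
          by_cases hj : j < (i : Int)
          · exact hp j hj1 hj
          · have : j = (i : Int) := by omega
            rw [this]; exact ht
        rw [hfe, hcast]
        exact ihQ s e spans hse (by omega) he hp'
    · -- class 'O'
      have hw : pvIsWordCharPy (PySem.List.pyGetD chars (i : Int) "") = false := by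
        rw [hword, hc]; rfl
      have hfe : pvFindEnd chars (i : Int) = (i : Int) :=
        pvFindEnd_stop chars (i : Int) (by rw [hw]; simp)
      constructor
      · intro spans
        rw [pvLoopA_nonword chars (i : Int) spans hilen hw, hcast, ihP spans, hdrop, hc]
        have hspec : specGo ('O' :: (chars.map pvClsOf).drop (i + 1)) (i : Int) none
            = specGo ((chars.map pvClsOf).drop (i + 1)) ((i : Int) + 1) none := by
          simp [specGo]
        rw [hspec, hcast]
      · intro s e spans hse hei he hp
        rw [hdrop, hc]
        have hspec : specGo ('O' :: (chars.map pvClsOf).drop (i + 1)) (i : Int) (some (s, e))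
            = (s, e) :: specGo ((chars.map pvClsOf).drop (i + 1)) ((i : Int) + 1) none := by
          simp [specGo]
        rw [hspec, hfe, pvTrimEnd_of_Ps chars s e (i : Int) hei hse he hp]
        rw [pvLoopA_nonword chars (i : Int) (spans ++ [(s, e)]) hilen hw, hcast, ihP (spans ++ [(s, e)])]
        simp

-- ---------- B-side sweep lemmas ----------

theorem pvStartStep_eq (l : Char) (acc : List Int) (j : Int) (c : Char) :
    pvStartStep (l, acc) (j, c)
      = ((if c = 'P' then l else c), if c = 'A' ∧ l = 'O' then acc ++ [j] else acc) := by
  unfold pvStartStep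
  by_cases h1 : c = 'A'
  · subst h1
    by_cases h2 : l = 'O' <;> simp [h2]
  · by_cases h2 : c = 'P' <;> simp [h1, h2]

theorem pvEndStep_eq (l : Char) (acc : List Int) (j : Int) (c : Char) :
    pvEndStep (l, acc) (j, c)
      = ((if c = 'P' then l else c), if c = 'A' ∧ l = 'O' then acc ++ [j + 1] else acc) := by
  unfold pvEndStep
  by_cases h1 : c = 'A'
  · subst h1
    by_cases h2 : l = 'O' <;> simp [h2]
  · by_cases h2 : c = 'P' <;> simp [h1, h2]

theorem startsFold_eq (cs : List Char) : ∀ (j : Int) (l : Char) (acc : List Int),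
    ((PySem.List.enumerate cs j).foldl pvStartStep (l, acc)).2 = acc ++ startsGo cs j l := by
  induction cs with
  | nil => intro j l acc; simp [PySem.List.enumerate_nil, startsGo]
  | cons c cs ih =>
    intro j l acc
    rw [PySem.List.enumerate_cons, List.foldl_cons, pvStartStep_eq, ih]
    by_cases h1 : c = 'A' ∧ l = 'O' <;> simp [startsGo, h1]

theorem fNP_cases (cs : List Char) (hwf : ∀ c ∈ cs, c = 'A' ∨ c = 'P' ∨ c = 'O') :
    fNP cs = 'A' ∨ fNP cs = 'O' := by
  induction cs with
  | nil => right; rfl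
  | cons c cs ih =>
    rcases hwf c (by simp) with rfl | rfl | rfl
    · left; rfl
    · exact ih (fun x hx => hwf x (by simp [hx]))
    · right; rfl

theorem startsGo_spec (cs : List Char) (hwf : ∀ c ∈ cs, c = 'A' ∨ c = 'P' ∨ c = 'O') :
    ∀ j : Int,
      (startsGo cs j 'O' = (specGo cs j none).map Prod.fst)
      ∧ (∀ s e : Int, (specGo cs j (some (s, e))).map Prod.fst = s :: startsGo cs j 'A') := by
  induction cs with
  | nil => intro j; simp [startsGo, specGo]
  | cons c cs ih =>
    intro j
    have hwf' : ∀ x ∈ cs, x = 'A' ∨ x = 'P' ∨ x = 'O' := fun x hx => hwf x (by simp [hx])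
    obtain ⟨ih1, ih2⟩ := ih hwf' (j + 1)
    rcases hwf c (by simp) with rfl | rfl | rfl
    · constructor
      · simp only [startsGo, specGo]
        simp [ih2 j (j + 1)]
      · intro s e
        simp only [startsGo, specGo]
        simp [ih2 s (j + 1)]
    · constructor
      · simp only [startsGo, specGo]
        simp [ih1]
      · intro s e
        simp only [startsGo, specGo]
        simp [ih2 s e]
    · constructor
      · simp only [startsGo, specGo]
        simp [ih1]
      · intro s e
        simp only [startsGo, specGo]
        simp [ih1]

theorem endsFold_eq (cs : List Char) (hwf : ∀ c ∈ cs, c = 'A' ∨ c = 'P' ∨ c = 'O') :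
    ∀ j : Int,
      (((PySem.List.enumerate cs j).foldr (fun p st => pvEndStep st p) ('O', [])).1 = fNP cs)
      ∧ ((((PySem.List.enumerate cs j).foldr (fun p st => pvEndStep st p) ('O', [])).2).reverse
          = (specGo cs j none).map Prod.snd)
      ∧ (∀ s e : Int, (specGo cs j (some (s, e))).map Prod.snd
          = if fNP cs = 'A'
            then (((PySem.List.enumerate cs j).foldr (fun p st => pvEndStep st p) ('O', [])).2).reverse
            else e :: (((PySem.List.enumerate cs j).foldr (fun p st => pvEndStep st p) ('O', [])).2).reverse) := by
  induction cs with
  | nil => intro j; simp [PySem.List.enumerate_nil, specGo, fNP]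
  | cons c cs ih =>
    intro j
    have hwf' : ∀ x ∈ cs, x = 'A' ∨ x = 'P' ∨ x = 'O' := fun x hx => hwf x (by simp [hx])
    obtain ⟨ih1, ih2, ih3⟩ := ih hwf' (j + 1)
    have hstep : ((PySem.List.enumerate (c :: cs) j).foldr (fun p st => pvEndStep st p) ('O', []))
        = pvEndStep ((PySem.List.enumerate cs (j + 1)).foldr (fun p st => pvEndStep st p) ('O', [])) (j, c) := by
      rw [PySem.List.enumerate_cons, List.foldr_cons]
    set R := (PySem.List.enumerate cs (j + 1)).foldr (fun p st => pvEndStep st p) ('O', []) with hR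
    have hRp : R = (R.1, R.2) := rfl
    rcases hwf c (by simp) with rfl | rfl | rfl
    · -- c = 'A'
      rcases fNP_cases cs hwf' with hf | hf
      · have hemit : ((PySem.List.enumerate ('A' :: cs) j).foldr (fun p st => pvEndStep st p) ('O', []))
            = ('A', R.2) := by
          rw [hstep, hRp, pvEndStep_eq]
          simp [ih1, hf]
        refine ⟨by rw [hemit]; simp [fNP], ?_, ?_⟩
        · rw [hemit]
          simp only [specGo]
          simp [ih3 j (j + 1), hf]
        · intro s e
          rw [hemit]
          simp only [specGo, fNP]
          simp [ih3 s (j + 1), hf]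
      · have hemit : ((PySem.List.enumerate ('A' :: cs) j).foldr (fun p st => pvEndStep st p) ('O', []))
            = ('A', R.2 ++ [j + 1]) := by
          rw [hstep, hRp, pvEndStep_eq]
          simp [ih1, hf]
        refine ⟨by rw [hemit]; simp [fNP], ?_, ?_⟩
        · rw [hemit]
          simp only [specGo]
          simp [ih3 j (j + 1), hf]
        · intro s e
          rw [hemit]
          simp only [specGo, fNP]
          simp [ih3 s (j + 1), hf]
    · -- c = 'P'
      have hemit : ((PySem.List.enumerate ('P' :: cs) j).foldr (fun p st => pvEndStep st p) ('O', []))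
          = (R.1, R.2) := by
        rw [hstep, hRp, pvEndStep_eq]
        simp
      refine ⟨by rw [hemit]; simp [fNP, ih1], ?_, ?_⟩
      · rw [hemit]
        simp only [specGo]
        simp [ih2]
      · intro s e
        rw [hemit]
        simp only [specGo, fNP]
        simp [ih3 s e]
    · -- c = 'O'
      have hemit : ((PySem.List.enumerate ('O' :: cs) j).foldr (fun p st => pvEndStep st p) ('O', []))
          = ('O', R.2) := by
        rw [hstep, hRp, pvEndStep_eq]
        simp
      refine ⟨by rw [hemit]; simp [fNP], ?_, ?_⟩
      · rw [hemit]
        simp only [specGo]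
        simp [ih2]
      · intro s e
        rw [hemit]
        simp only [specGo, fNP]
        simp [ih2]

theorem zip_fst_snd {α β : Type} (l : List (α × β)) :
    (l.map Prod.fst).zip (l.map Prod.snd) = l := by
  induction l with
  | nil => rfl
  | cons x xs ih => simp [ih]

-- ===== VERDICT (by name: the statement is the Claim_ definition above) =====
theorem iter_word_spans_py_spec : Claim_equal_iter_word_spans_py := by
  intro chars _hdom
  unfold Spec_iter_word_spans_py
  have hwf : ∀ c ∈ chars.map pvClsOf, c = 'A' ∨ c = 'P' ∨ c = 'O' := by
    intro c hc
    rcases List.mem_map.mp hc with ⟨ch, _, rfl⟩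
    exact pvClsOf_cases ch
  have hA : iter_word_spans_py chars = specGo (chars.map pvClsOf) 0 none := by
    have h := (pvMainA chars chars.length 0 (by omega) (by omega)).1 []
    unfold iter_word_spans_py
    simpa using h
  have hstarts : ((PySem.List.enumerate (chars.map pvClsOf)).foldl pvStartStep ('O', [])).2
      = (specGo (chars.map pvClsOf) 0 none).map Prod.fst := by
    rw [startsFold_eq (chars.map pvClsOf) 0 'O' []]
    simpa using (startsGo_spec (chars.map pvClsOf) hwf 0).1
  have hends : ((((PySem.List.enumerate (chars.map pvClsOf)).reverse).foldl pvEndStep ('O', [])).2).reverse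
      = (specGo (chars.map pvClsOf) 0 none).map Prod.snd := by
    rw [List.foldl_reverse]
    exact (endsFold_eq (chars.map pvClsOf) hwf 0).2.1
  show pvLoopA chars 0 [] = iter_word_spans_py_alt chars
  unfold iter_word_spans_py_alt
  rw [show pvLoopA chars 0 [] = iter_word_spans_py chars from rfl, hA]
  simp only [hstarts, hends]
  exact (zip_fst_snd _).symm
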